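-- pv_equiv track=rewrite | github.com/koii-network/prometheus-beta | src/substring_reverser.py | reverse_substring
-- ===== SOURCE A (Python) =====
-- def reverse_substring(original_string, start_index, end_index):
--     """
--     Reverse a specific substring within a given string without using built-in reverse methods.
--
--     Args:
--         original_string (str): The original input string
--         start_index (int): The starting index of the substring to reverse (inclusive)
--         end_index (int): The ending index of the substring to reverse (inclusive)
--
--     Returns:
--         str: A new string with the specified substring reversed
--
--     Raises:
--         ValueError: If indices are out of bounds or invalid
--     """
--     # Validate input indices
--     if not isinstance(original_string, str):
--         raise TypeError("Input must be a string")
--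
--     if start_index < 0 or end_index < 0:
--         raise ValueError("Indices must be non-negative")
--
--     if start_index > end_index:
--         raise ValueError("Start index must be less than or equal to end index")
--
--     if end_index >= len(original_string):
--         raise ValueError("End index is out of bounds")
--
--     # Convert string to list for easier manipulation
--     chars = list(original_string)
--
--     # Reverse the substring in-place
--     while start_index < end_index:
--         chars[start_index], chars[end_index] = chars[end_index], chars[start_index]
--         start_index += 1
--         end_index -= 1
--
--     # Convert back to string
--     return ''.join(chars)
-- ===== SOURCE B (Python) =====
-- def reverse_substring(original_string, start_index, end_index):
--     if not isinstance(original_string, str):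
--         raise TypeError("Input must be a string")
--     if start_index < 0 or end_index < 0:
--         raise ValueError("Indices must be non-negative")
--     if start_index > end_index:
--         raise ValueError("Start index must be less than or equal to end index")
--     if end_index >= len(original_string):
--         raise ValueError("End index is out of bounds")
--     return (original_string[:start_index]
--             + original_string[start_index:end_index + 1][::-1]
--             + original_string[end_index + 1:])
-- ===== Notes on version B (the rewrite author's own statement) =====
-- stated objective: idiomatic
-- what changed: Replaces the list conversion with two converging in-place swap pointers by direct slice concatenation (prefix + reversed middle slice + suffix), with the same validation block.
import Mathlib
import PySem

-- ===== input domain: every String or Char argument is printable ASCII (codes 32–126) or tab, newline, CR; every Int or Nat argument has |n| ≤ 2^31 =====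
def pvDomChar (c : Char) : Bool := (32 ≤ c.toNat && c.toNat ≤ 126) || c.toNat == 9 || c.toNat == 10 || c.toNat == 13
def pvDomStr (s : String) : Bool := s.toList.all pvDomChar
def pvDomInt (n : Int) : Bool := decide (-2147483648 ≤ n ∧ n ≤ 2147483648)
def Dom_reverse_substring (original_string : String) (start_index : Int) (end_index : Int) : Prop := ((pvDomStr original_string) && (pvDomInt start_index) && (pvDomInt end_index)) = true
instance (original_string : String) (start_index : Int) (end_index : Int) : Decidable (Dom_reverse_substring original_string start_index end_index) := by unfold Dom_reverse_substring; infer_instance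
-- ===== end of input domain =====

-- B replaces A's two-pointer in-place swap loop over a char list with slice concatenation
-- (prefix + reversed middle slice + suffix); the validation block is unchanged.

-- ===== PORT A =====
-- the 'while start_index < end_index' swap loop over the char list
def pvRevLoopA (chars : List Char) (s e : Int) : List Char :=
  if s < e then
    match PySem.List.pyGet? chars s, PySem.List.pyGet? chars e with
    | some a, some b =>
        pvRevLoopA (PySem.List.pySetD (PySem.List.pySetD chars s b) e a) (s + 1) (e - 1)
    | _, _ => chars   -- totalization guard: unreachable under Pre_ (both indices are in range)
  else chars
termination_by (e - s).toNat
decreasing_by simp only [Int.lt_iff_add_one_le] at *; omega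

def reverse_substring (original_string : String) (start_index : Int) (end_index : Int) : String :=
  if start_index < 0 ∨ end_index < 0 then ""                   -- raise ValueError
  else if start_index > end_index then ""                      -- raise ValueError
  else if end_index ≥ PySem.Str.len original_string then ""    -- raise ValueError
  else String.ofList (pvRevLoopA original_string.toList start_index end_index)

-- ===== PORT B =====
def reverse_substring_alt (original_string : String) (start_index : Int) (end_index : Int) : String :=
  if start_index < 0 ∨ end_index < 0 then ""                   -- raise ValueError
  else if start_index > end_index then ""                      -- raise ValueError
  else if end_index ≥ PySem.Str.len original_string then ""    -- raise ValueError
  else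
    String.ofList (PySem.List.slice original_string.toList none (some start_index)
      ++ (PySem.List.slice original_string.toList (some start_index) (some (end_index + 1))).reverse
      ++ PySem.List.slice original_string.toList (some (end_index + 1)) none)

-- ===== PRECONDITION & SPEC =====
-- Pre_ excludes exactly the inputs on which A raises ValueError (negative, inverted or out-of-bounds indices)
def Pre_reverse_substring (original_string : String) (start_index : Int) (end_index : Int) : Prop :=
  0 ≤ start_index ∧ start_index ≤ end_index ∧ end_index < PySem.Str.len original_string
instance (original_string : String) (start_index : Int) (end_index : Int) : Decidable (Pre_reverse_substring original_string start_index end_index) := by unfold Pre_reverse_substring; infer_instance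

def pvWitness_reverse_substring : String × Int × Int := ("abcdef", 1, 4)

def Spec_reverse_substring (original_string : String) (start_index : Int) (end_index : Int) (out : String) : Prop := out = reverse_substring_alt original_string start_index end_index
instance (original_string : String) (start_index : Int) (end_index : Int) (out : String) : Decidable (Spec_reverse_substring original_string start_index end_index out) := by unfold Spec_reverse_substring; infer_instance

-- ===== CLAIM (what is proved, stated in full; the proofs are below) =====
def Claim_equal_reverse_substring : Prop := ∀ (original_string : String) (start_index : Int) (end_index : Int), Dom_reverse_substring original_string start_index end_index → Pre_reverse_substring original_string start_index end_index → Spec_reverse_substring original_string start_index end_index (reverse_substring original_string start_index end_index)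

-- ===== LEMMAS AND PROOFS =====

lemma take_one_reverse (xs : List Char) : (xs.take 1).reverse = xs.take 1 := by
  cases xs <;> simp

-- A's swap loop, run from s to e inside bounds, is exactly prefix ++ reversed middle ++ suffix
lemma pvRevLoopA_eq (l : List Char) (s e : Nat) (h1 : s ≤ e + 1) (h2 : e < l.length) :
    pvRevLoopA l (s : Int) (e : Int)
      = l.take s ++ ((l.drop s).take (e + 1 - s)).reverse ++ l.drop (e + 1) := by
  induction hn : e + 1 - s using Nat.strong_induction_on generalizing l s e with
  | _ n ih =>
  rw [← hn, pvRevLoopA]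
  by_cases hse : s < e
  · have hsl : s < l.length := by omega
    rw [if_pos (by exact_mod_cast hse)]
    simp only [PySem.List.pyGet?_natCast, List.getElem?_eq_getElem hsl,
      List.getElem?_eq_getElem h2, PySem.List.pySetD_natCast]
    have hc1 : (s : Int) + 1 = ((s + 1 : Nat) : Int) := by push_cast; ring
    have hc2 : (e : Int) - 1 = ((e - 1 : Nat) : Int) := by omega
    rw [hc1, hc2, ih (e - 1 + 1 - (s + 1)) (by omega) _ _ _ (by omega) (by simp; omega) rfl]
    rw [show e - 1 + 1 - (s + 1) = e - s - 1 from by omega, show e - 1 + 1 = e from by omega]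
    set M := (l.drop (s+1)).take (e - s - 1) with hM
    have hMlen : M.length = e - s - 1 := by simp [hM]; omega
    have hl' : (l.set s l[e]).set e l[s]
        = l.take s ++ l[e] :: (M ++ l[s] :: l.drop (e+1)) := by
      rw [List.set_comm _ _ (by omega : s ≠ e), List.set_eq_take_cons_drop _ h2,
        List.set_append_left _ _ (by simp; omega),
        List.set_eq_take_cons_drop _ (by simp; omega), List.take_take, List.drop_take]
      have g2 : min s e = s := by omega
      have g3 : e - (s+1) = e - s - 1 := by omega
      rw [g2, g3, ← hM]
      simp
    have hPlen : (l.take s).length = s := by simp; omega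
    have hTake : ((l.set s l[e]).set e l[s]).take (s+1) = l.take s ++ [l[e]] := by
      rw [hl', List.take_append, hPlen, List.take_of_length_le (by omega)]
      simp
    have hDropS1 : ((l.set s l[e]).set e l[s]).drop (s+1) = M ++ l[s] :: l.drop (e+1) := by
      rw [hl', List.drop_append, hPlen, List.drop_eq_nil_of_le (by omega)]
      simp
    have hMidTake : (((l.set s l[e]).set e l[s]).drop (s+1)).take (e - s - 1) = M := by
      rw [hDropS1, List.take_append, hMlen, List.take_of_length_le (by omega)]
      simp
    have hDropE : ((l.set s l[e]).set e l[s]).drop e = l[s] :: l.drop (e+1) := by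
      rw [hl', List.drop_append, hPlen, List.drop_eq_nil_of_le (by omega)]
      have : e - s = (l[e] :: M).length := by simp [hMlen]; omega
      rw [this, List.nil_append,
        show l[e] :: (M ++ l[s] :: l.drop (e+1)) = (l[e] :: M) ++ l[s] :: l.drop (e+1) from rfl,
        List.drop_left]
    have hMid : (l.drop s).take (e + 1 - s) = l[s] :: (M ++ [l[e]]) := by
      rw [List.drop_eq_getElem_cons hsl, show e + 1 - s = (e - s - 1) + 1 + 1 by omega]
      simp only [List.take_succ_cons]
      congr 1
      rw [List.take_add_one, ← hM, List.getElem?_drop,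
        show s + 1 + (e - s - 1) = e by omega, List.getElem?_eq_getElem h2]
      rfl
    rw [hTake, hMidTake, hDropE, hMid]
    simp
  · rw [if_neg (by exact_mod_cast hse)]
    rcases (by omega : s = e + 1 ∨ s = e) with h | h
    · subst h; simp
    · subst h
      rw [show s + 1 - s = 1 from by omega, take_one_reverse]
      have : (l.drop s).take 1 ++ l.drop (s + 1) = l.drop s := by
        rw [show l.drop (s+1) = (l.drop s).drop 1 by simp [List.drop_drop]]
        exact List.take_append_drop 1 (l.drop s)
      rw [List.append_assoc, this, List.take_append_drop]

-- ===== VERDICT (by name: the statement is the Claim_ definition above) =====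
theorem reverse_substring_spec : Claim_equal_reverse_substring := by
  intro os s e _ hpre
  obtain ⟨h0, h1, h2⟩ := hpre
  unfold Spec_reverse_substring reverse_substring reverse_substring_alt
  have h2' : e.toNat < os.toList.length := by
    rw [PySem.Str.len_eq] at h2; omega
  have c1 : ¬ (s < 0 ∨ e < 0) := by omega
  have c2 : ¬ s > e := by omega
  have c3 : ¬ e ≥ PySem.Str.len os := by omega
  rw [if_neg c1, if_neg c2, if_neg c3, if_neg c1, if_neg c2, if_neg c3]
  rw [PySem.List.slice_to _ (by omega), PySem.List.slice_toNat _ (by omega) (by omega),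
    PySem.List.slice_from _ (by omega)]
  rw [show s = ((s.toNat : Nat) : Int) from by omega, show e = ((e.toNat : Nat) : Int) from by omega,
    pvRevLoopA_eq _ s.toNat e.toNat (by omega) h2']
  rw [show ((s.toNat : Int)).toNat = s.toNat from by omega,
    show (((e.toNat : Int)) + 1).toNat = e.toNat + 1 from by omega]
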